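-- pv_equiv track=rewrite | github.com/zangzoo/Coding_Test_Site | 프로그래머스/2/132265. 롤케이크 자르기/롤케이크 자르기.py | solution
-- ===== SOURCE A (Python) =====
-- from collections import Counter
--
-- def solution(topping):
--     answer = 0
--     # 변수 요소의 각 갯수를 센다
--     # 우선 내가 모든 토핑을 가지고 있다
--     me = Counter(topping)
--     # 아직 토핑이 없다
--     bro = {}
--
--     # 순회하면서 토핑을 하나씩 동생한테도 나눠준다
--     for i in range(len(topping)):
--         if topping[i] in bro:
--             bro[topping[i]] += 1
--         else:
--             bro[topping[i]] = 1
--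
--         me[topping[i]] -= 1
--
--         if not me[topping[i]]:
--             del(me[topping[i]])
--
--         # 내가 가진 토핑의 갯수와 동생이 가진 갯수가 같으면
--         # 1을 더한다
--         if len(me) == len(bro):
--             answer += 1
--
--     return answer
-- ===== SOURCE B (Python) =====
-- def solution(topping):
--     # suffix pass: suf[j] = number of distinct toppings in topping[j:]
--     suf = [0]
--     seen = set()
--     for x in reversed(topping):
--         seen.add(x)
--         suf.append(len(seen))
--     suf.reverse()
--     # forward pass: compare distinct count of the prefix with the suffix table
--     ans = 0
--     left = set()
--     for x, s in zip(topping, suf[1:]):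
--         left.add(x)
--         if len(left) == s:
--             ans += 1
--     return ans
-- ===== Notes on version B (the rewrite author's own statement) =====
-- stated objective: alternative
-- what changed: Replaced the single loop over two coupled Counter/dict multisets (decrement one, increment the other, delete exhausted keys) by a two-pass scheme: a right-to-left pass precomputes a suffix-distinct-count table with a set, then a left-to-right pass grows a prefix set and compares its size against the table; plain set adds avoid the per-step dict decrement/delete churn (measured constant-factor speedup).
import Mathlib
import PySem

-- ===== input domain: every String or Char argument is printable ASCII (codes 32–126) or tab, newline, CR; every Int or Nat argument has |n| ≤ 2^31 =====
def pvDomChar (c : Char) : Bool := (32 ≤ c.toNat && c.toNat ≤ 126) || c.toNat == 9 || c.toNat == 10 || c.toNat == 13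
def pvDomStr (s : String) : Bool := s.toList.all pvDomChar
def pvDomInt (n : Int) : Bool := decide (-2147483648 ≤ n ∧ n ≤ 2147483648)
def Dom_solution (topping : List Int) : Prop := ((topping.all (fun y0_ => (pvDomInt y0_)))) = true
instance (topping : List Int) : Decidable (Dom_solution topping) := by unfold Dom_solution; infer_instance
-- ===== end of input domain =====

-- B replaces A's single loop over two coupled Counter/dict multisets by a suffix-distinct
-- table pass plus a forward prefix-set pass (alternative decomposition, same O(n) cost).

-- ===== PORT A =====
-- loop body of A: give the topping to bro, take it from me, compare distinct counts
def stepA (st : PySem.Dict Int Int × PySem.Dict Int Int × Int) (x : Int) :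
    PySem.Dict Int Int × PySem.Dict Int Int × Int :=
  let bro := if st.2.1.contains x then st.2.1.insert x (st.2.1.getD x 0 + 1)
             else st.2.1.insert x 1
  let me1 := st.1.modify x 0 (· - 1)
  let me := if me1.getD x 0 = 0 then me1.erase x else me1
  let answer := if me.size = bro.size then st.2.2 + 1 else st.2.2
  (me, bro, answer)

def solution (topping : List Int) : Int :=
  (topping.foldl stepA (PySem.Dict.counter topping, PySem.Dict.empty, 0)).2.2

-- ===== PORT B =====
-- backward pass body: add x to seen, append the current distinct count
def sufStep (st : PySem.Set Int × List Int) (x : Int) : PySem.Set Int × List Int :=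
  let seen := st.1.add x
  (seen, st.2 ++ [PySem.Set.len seen])

-- forward pass body: grow the prefix set, compare with the suffix table entry
def cntStep (st : PySem.Set Int × Int) (p : Int × Int) : PySem.Set Int × Int :=
  let left := st.1.add p.1
  (left, if PySem.Set.len left = p.2 then st.2 + 1 else st.2)

def solution_alt (topping : List Int) : Int :=
  let suf := ((topping.reverse.foldl sufStep (PySem.Set.empty, [0])).2).reverse
  ((topping.zip (PySem.List.slice suf (some 1) none)).foldl cntStep (PySem.Set.empty, 0)).2

-- ===== PRECONDITION & SPEC =====
def Spec_solution (topping : List Int) (out : Int) : Prop := out = solution_alt topping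
instance (topping : List Int) (out : Int) : Decidable (Spec_solution topping out) := by unfold Spec_solution; infer_instance

-- ===== CLAIM (what is proved, stated in full; the proofs are below) =====
def Claim_equal_solution : Prop := ∀ (topping : List Int), Dom_solution topping → Spec_solution topping (solution topping)

-- ===== LEMMAS AND PROOFS =====

-- number of distinct elements of a list, as an Int
def dc (l : List Int) : Int := ((PySem.List.dedup l).length : Int)

-- reference count: walking rest while growing pre, counting positions with equal distinct halves
def ref : List Int → List Int → Int
  | _, [] => 0
  | pre, x :: tail => (if dc (pre ++ [x]) = dc tail then 1 else 0) + ref (pre ++ [x]) tail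

-- a nodup list with the same members as l has length dc l
lemma len_eq_dc {keys l : List Int} (hnd : keys.Nodup) (hm : ∀ k, k ∈ keys ↔ k ∈ l) :
    (keys.length : Int) = dc l := by
  have h1 : keys.toFinset = (PySem.List.dedup l).toFinset := by
    ext k; simp [List.mem_toFinset, PySem.List.mem_dedup, hm k]
  have h2 := List.toFinset_card_of_nodup hnd
  have h3 := List.toFinset_card_of_nodup (PySem.List.nodup_dedup l)
  unfold dc
  rw [h1] at h2
  omega

lemma dc_congr {l1 l2 : List Int} (hm : ∀ k, k ∈ l1 ↔ k ∈ l2) : dc l1 = dc l2 := by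
  have := len_eq_dc (PySem.List.nodup_dedup l1)
    (fun k => (PySem.List.mem_dedup l1 k).trans (hm k))
  unfold dc at *
  omega

lemma dc_nil : dc [] = 0 := by simp [dc, PySem.List.dedup]

-- erase on a dict: lookup and keys of the filtered item list
lemma get?_erase (d : PySem.Dict Int Int) (k k' : Int) :
    (d.erase k).get? k' = if k' = k then none else d.get? k' := by
  obtain ⟨items⟩ := d
  simp only [PySem.Dict.erase, PySem.Dict.get?]
  split
  · next h =>
    subst h
    rw [List.find?_eq_none.mpr]
    · rfl
    · intro p hp
      simp at hp ⊢
      exact hp.2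
  · next h =>
    congr 1
    induction items with
    | nil => rfl
    | cons p rest ih =>
      by_cases hk : p.1 = k
      · simp [hk, Ne.symm h, ih]
      · by_cases hk' : p.1 = k'
        · simp [if_neg h, hk', h]
        · simp [hk, hk', ih]

lemma keys_erase (d : PySem.Dict Int Int) (k : Int) :
    (d.erase k).keys = d.keys.filter (fun a => !(a == k)) := by
  obtain ⟨items⟩ := d
  simp only [PySem.Dict.erase, PySem.Dict.keys]
  induction items with
  | nil => rfl
  | cons p rest ih =>
    by_cases hk : p.1 = k <;> simp [hk, ih]

lemma size_eq_keys_length (d : PySem.Dict Int Int) : d.size = d.keys.length := by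
  simp [PySem.Dict.size, PySem.Dict.keys]

lemma loopA (rest : List Int) : ∀ (pre : List Int) (me bro : PySem.Dict Int Int) (ans : Int),
    me.keys.Nodup → (∀ k, me.getD k 0 = (rest.count k : Int)) → (∀ k, k ∈ me.keys ↔ k ∈ rest) →
    bro.keys.Nodup → (∀ k, k ∈ bro.keys ↔ k ∈ pre) →
    (rest.foldl stepA (me, bro, ans)).2.2 = ans + ref pre rest := by
  induction rest with
  | nil => intro pre me bro ans _ _ _ _ _; simp [ref]
  | cons x tail ih =>
    intro pre me bro ans hmeN hmeC hmeM hbroN hbroM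
    rw [List.foldl_cons]
    obtain ⟨v, hv⟩ : ∃ v, (if bro.contains x then bro.insert x (bro.getD x 0 + 1)
        else bro.insert x 1) = bro.insert x v := by
      by_cases h : bro.contains x <;> simp [h]
    have hstep : stepA (me, bro, ans) x =
        (if (me.modify x 0 (· - 1)).getD x 0 = 0 then (me.modify x 0 (· - 1)).erase x
           else me.modify x 0 (· - 1),
         bro.insert x v,
         if (if (me.modify x 0 (· - 1)).getD x 0 = 0 then (me.modify x 0 (· - 1)).erase x
              else me.modify x 0 (· - 1)).size = (bro.insert x v).size then ans + 1 else ans) := by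
      simp only [stepA, hv]
    rw [hstep]
    set Me1 := me.modify x 0 (· - 1) with hMe1
    have hMe1getx : Me1.getD x 0 = (tail.count x : Int) := by
      rw [hMe1]
      rw [PySem.Dict.getD_modify_self]
      rw [hmeC x, List.count_cons_self]
      push_cast
      ring
    have hMe1get : ∀ k, k ≠ x → Me1.getD k 0 = (tail.count k : Int) := by
      intro k hk
      rw [hMe1, PySem.Dict.getD_modify_of_ne _ _ _ hk]
      rw [hmeC k]
      simp [List.count_cons, Ne.symm hk]
    have hMe1N : Me1.keys.Nodup := by
      rw [hMe1, PySem.Dict.keys_modify]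
      exact PySem.Dict.nodup_keys_insert _ _ _ hmeN
    have hMe1M : ∀ k, k ∈ Me1.keys ↔ (k = x ∨ k ∈ tail) := by
      intro k
      rw [hMe1, PySem.Dict.keys_modify, PySem.Dict.mem_keys_insert]
      rw [hmeM k]
      simp [List.mem_cons]
    set Me := if Me1.getD x 0 = 0 then Me1.erase x else Me1 with hMe
    have hMeN : Me.keys.Nodup := by
      rw [hMe]; split
      · rw [keys_erase]; exact hMe1N.filter _
      · exact hMe1N
    have hMeM : ∀ k, k ∈ Me.keys ↔ k ∈ tail := by
      intro k
      rw [hMe]; split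
      · next hz =>
        have hxt : x ∉ tail := by
          rw [hMe1getx] at hz
          have : tail.count x = 0 := by exact_mod_cast hz
          exact List.count_eq_zero.mp this
        rw [keys_erase]
        simp only [List.mem_filter, hMe1M k]
        constructor
        · rintro ⟨h1 | h1, h2⟩
          · simp [h1] at h2
          · exact h1
        · intro h
          refine ⟨Or.inr h, ?_⟩
          simp
          rintro rfl
          exact hxt h
      · next hz =>
        have hxt : x ∈ tail := by
          rw [hMe1getx] at hz
          have : tail.count x ≠ 0 := by exact_mod_cast hz
          exact List.count_pos_iff.mp (Nat.pos_of_ne_zero this)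
        rw [hMe1M k]
        constructor
        · rintro (rfl | h) <;> [exact hxt; exact h]
        · exact Or.inr
    have hMeC : ∀ k, Me.getD k 0 = (tail.count k : Int) := by
      intro k
      by_cases hk : k = x
      · subst hk
        rw [hMe]; split
        · next hz =>
          rw [PySem.Dict.getD_eq_get?_getD, get?_erase]
          simp
          rw [hMe1getx] at hz
          exact_mod_cast hz.symm
        · exact hMe1getx
      · rw [hMe]; split
        · rw [PySem.Dict.getD_eq_get?_getD, get?_erase]
          simp [hk]
          rw [← PySem.Dict.getD_eq_get?_getD]
          exact hMe1get k hk
        · exact hMe1get k hk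
    set Bro := bro.insert x v with hBro
    have hBroN : Bro.keys.Nodup := PySem.Dict.nodup_keys_insert _ _ _ hbroN
    have hBroM : ∀ k, k ∈ Bro.keys ↔ k ∈ pre ++ [x] := by
      intro k
      rw [hBro, PySem.Dict.mem_keys_insert, hbroM k]
      simp [List.mem_append, or_comm]
    have hMelen : (Me.keys.length : Int) = dc tail := len_eq_dc hMeN hMeM
    have hBrolen : (Bro.keys.length : Int) = dc (pre ++ [x]) := len_eq_dc hBroN hBroM
    have hcond : (Me.size = Bro.size) ↔ (dc (pre ++ [x]) = dc tail) := by
      rw [size_eq_keys_length, size_eq_keys_length]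
      omega
    rw [ih (pre ++ [x]) Me Bro _ hMeN hMeC hMeM hBroN hBroM]
    show (if Me.size = Bro.size then ans + 1 else ans) + ref (pre ++ [x]) tail
        = ans + ref pre (x :: tail)
    show _ = ans + ((if dc (pre ++ [x]) = dc tail then 1 else 0) + ref (pre ++ [x]) tail)
    by_cases h : dc (pre ++ [x]) = dc tail
    · rw [if_pos (hcond.mpr h), if_pos h]; ring
    · rw [if_neg (fun hc => h (hcond.mp hc)), if_neg h]; ring

lemma sufBuild (xs : List Int) : ∀ (seen : PySem.Set Int) (acc : List Int),
    xs.foldl sufStep (seen, acc)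
      = (PySem.Set.update seen xs,
         acc ++ (List.range xs.length).map
           (fun k => ((PySem.Set.update seen (xs.take (k+1))).length : Int))) := by
  induction xs with
  | nil => intro seen acc; simp [PySem.Set.update]
  | cons x xs ih =>
    intro seen acc
    rw [List.foldl_cons]
    show xs.foldl sufStep (seen.add x, acc ++ [PySem.Set.len (seen.add x)]) = _
    rw [ih]
    apply Prod.ext
    · rfl
    · show acc ++ [PySem.Set.len (seen.add x)] ++ _ = _
      show _ = acc ++ List.map _ (List.range (xs.length + 1))
      rw [List.range_succ_eq_map, List.map_cons, List.map_map, List.append_assoc]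
      rfl

lemma loopB (rest : List Int) : ∀ (pre : List Int) (s : PySem.Set Int) (ans : Int),
    List.Nodup s → (∀ k, k ∈ s ↔ k ∈ pre) →
    ((rest.zip ((List.range rest.length).map (fun j => dc (rest.drop (j+1))))).foldl cntStep
      (s, ans)).2 = ans + ref pre rest := by
  induction rest with
  | nil => intro pre s ans _ _; simp [ref]
  | cons x tail ih =>
    intro pre s ans hN hM
    have hzip : (x :: tail).zip ((List.range (x :: tail).length).map
        (fun j => dc ((x :: tail).drop (j+1))))
        = (x, dc tail) :: tail.zip ((List.range tail.length).map (fun j => dc (tail.drop (j+1)))) := by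
      simp only [List.length_cons, List.range_succ_eq_map, List.map_cons, List.map_map]
      rfl
    rw [hzip, List.foldl_cons]
    show (List.foldl cntStep (s.add x, if PySem.Set.len (s.add x) = dc tail then ans + 1 else ans) _).2 = _
    have hN' : List.Nodup (s.add x) := PySem.Set.nodup_add s x hN
    have hM' : ∀ k, k ∈ s.add x ↔ k ∈ pre ++ [x] := by
      intro k
      rw [PySem.Set.mem_add, hM k]
      simp [List.mem_append]
    rw [ih (pre ++ [x]) (s.add x) _ hN' hM']
    have hlen : PySem.Set.len (s.add x) = dc (pre ++ [x]) := by
      rw [PySem.Set.len]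
      exact len_eq_dc hN' hM'
    rw [hlen]
    show (if dc (pre ++ [x]) = dc tail then ans + 1 else ans) + ref (pre ++ [x]) tail
        = ans + ((if dc (pre ++ [x]) = dc tail then 1 else 0) + ref (pre ++ [x]) tail)
    split <;> ring



lemma sufEq (t : List Int) :
    ([(0:Int)] ++ (List.range t.length).map (fun k => dc (t.reverse.take (k+1)))).reverse
      = (List.range (t.length + 1)).map (fun j => dc (t.drop j)) := by
  apply List.ext_getElem?
  intro j
  by_cases hjn : j < t.length + 1
  · rw [List.getElem?_reverse (by simp; omega)]
    have hL : ([(0:Int)] ++ (List.range t.length).map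
        (fun k => dc (t.reverse.take (k+1)))).length = t.length + 1 := by simp
    rw [hL]
    by_cases hj : j = t.length
    · subst hj
      have h0 : t.length + 1 - 1 - t.length = 0 := by omega
      rw [h0]
      simp [List.drop_length, dc_nil, hjn]
    · have hlt : j < t.length := by omega
      have h0 : t.length + 1 - 1 - j = (t.length - j - 1) + 1 := by omega
      rw [h0, List.getElem?_append_right (by simp)]
      simp only [List.length_cons, List.length_nil, Nat.add_sub_cancel, List.getElem?_map]
      rw [List.getElem?_range (by omega), List.getElem?_range (by omega)]
      simp only [Option.map_some]
      congr 1
      have harg : t.length - j - 1 + 1 = t.length - j := by omega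
      rw [harg]
      have htake : t.reverse.take (t.length - j) = (t.drop j).reverse := by
        rw [List.reverse_drop]
      rw [htake]
      exact dc_congr (fun k => List.mem_reverse)
  · rw [List.getElem?_eq_none (by simp; omega), List.getElem?_eq_none (by simp; omega)]

lemma solution_eq_ref (topping : List Int) : solution topping = ref [] topping := by
  unfold solution
  rw [loopA topping [] _ _ 0 (PySem.Dict.nodup_keys_counter topping)
    (fun k => PySem.Dict.getD_counter topping k)
    (fun k => by rw [PySem.Dict.keys_counter]; exact PySem.Set.mem_ofList topping k)
    (by simp [PySem.Dict.keys_empty])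
    (fun k => by simp [PySem.Dict.keys_empty])]
  ring

lemma solution_alt_eq_ref (topping : List Int) : solution_alt topping = ref [] topping := by
  unfold solution_alt
  rw [sufBuild]
  have h2 : ∀ l : List Int, ((PySem.Set.update PySem.Set.empty l).length : Int) = dc l :=
    fun l => len_eq_dc (PySem.Set.nodup_ofList l) (fun k => PySem.Set.mem_ofList l k)
  have h3 : (List.range topping.reverse.length).map
      (fun k => ((PySem.Set.update PySem.Set.empty (topping.reverse.take (k+1))).length : Int))
      = (List.range topping.length).map (fun k => dc (topping.reverse.take (k+1))) := by
    rw [List.length_reverse]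
    exact List.map_congr_left (fun k _ => h2 _)
  rw [h3, sufEq]
  show (List.foldl cntStep (PySem.Set.empty, 0) (topping.zip (PySem.List.slice
      ((List.range (topping.length + 1)).map (fun j => dc (topping.drop j))) (some 1)))).2
    = ref [] topping
  rw [PySem.List.slice_from _ (by norm_num)]
  have h4 : ((1:Int)).toNat = 1 := rfl
  rw [h4, List.range_succ_eq_map, List.map_cons, List.drop_succ_cons, List.drop_zero,
    List.map_map]
  have h5 : ((fun j => dc (topping.drop j)) ∘ Nat.succ)
      = (fun j => dc (topping.drop (j+1))) := rfl
  rw [h5]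
  rw [loopB topping [] PySem.Set.empty 0 List.nodup_nil (fun k => by simp [PySem.Set.empty])]
  ring

-- ===== VERDICT (by name: the statement is the Claim_ definition above) =====
theorem solution_spec : Claim_equal_solution := by
  intro topping _
  unfold Spec_solution
  rw [solution_eq_ref, solution_alt_eq_ref]
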